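-- pv_equiv track=rewrite | github.com/Augl/advent-of-code | 2024/Day05/solver.py | compileRules
-- ===== SOURCE A (Python) =====
-- def compileRules(rules: list[tuple[int, int]]) -> dict[int, set[int]]:
--     """
--     Compiles the given list of rules into a more efficient format.
--     Returns a dictionary. For each number it contains a set of values that must be after the value.
--     """
--     result: dict[int, set[int]] = {}
--     for r in rules:
--         first = r[0]
--         after = r[1]
--         if not first in result:
--             result[first] = set()
--         result[first].add(after)
--     return result
-- ===== SOURCE B (Python) =====
-- def compileRules(rules: list[tuple[int, int]]) -> dict[int, set[int]]:
--     """
--     Compiles the given list of rules into a more efficient format.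
--     Returns a dictionary. For each number it contains a set of values that must be after the value.
--     """
--     keys = dict.fromkeys(first for first, _ in rules)
--     return {k: {after for first, after in rules if first == k} for k in keys}
-- ===== Notes on version B (the rewrite author's own statement) =====
-- stated objective: alternative
-- what changed: Replaces the single-pass accumulate-into-dict loop by a two-phase decomposition: first dedup the rule heads with dict.fromkeys, then build each key's successor set with its own comprehension over the rule list.
import Mathlib
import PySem

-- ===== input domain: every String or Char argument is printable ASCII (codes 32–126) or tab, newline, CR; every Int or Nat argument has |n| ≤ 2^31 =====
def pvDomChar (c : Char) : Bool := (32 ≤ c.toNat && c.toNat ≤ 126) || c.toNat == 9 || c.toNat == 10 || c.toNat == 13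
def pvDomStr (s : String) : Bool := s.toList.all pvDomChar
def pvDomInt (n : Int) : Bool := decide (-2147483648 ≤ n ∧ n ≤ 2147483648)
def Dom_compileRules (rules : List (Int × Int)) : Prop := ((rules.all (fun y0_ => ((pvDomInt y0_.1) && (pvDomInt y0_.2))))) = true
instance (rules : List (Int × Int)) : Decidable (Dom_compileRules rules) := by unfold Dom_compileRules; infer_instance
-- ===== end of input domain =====

-- B replaces A's single-pass dict accumulation by a dedup-the-keys pass followed by one
-- comprehension per key (objective: alternative decomposition, same results).

-- ===== PORT A =====
-- A: one pass over rules, inserting an empty set for unseen keys, then adding the successor.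
def compileRules (rules : List (Int × Int)) : List (Int × List Int) :=
  (rules.foldl
    (fun result r =>
      let first := r.1
      let after := r.2
      let result := if !(result.contains first) then result.insert first PySem.Set.empty else result
      result.insert first (PySem.Set.add (result.getD first PySem.Set.empty) after))
    (PySem.Dict.empty : PySem.Dict Int (PySem.Set Int))).items

-- ===== PORT B =====
-- B: keys = dict.fromkeys of the heads, then a set comprehension over rules per key.
def compileRules_alt (rules : List (Int × Int)) : List (Int × List Int) :=
  (PySem.List.dedup (rules.map (·.1))).map
    (fun k => (k, PySem.Set.ofList ((rules.filter (fun r => r.1 == k)).map (·.2))))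

-- ===== PRECONDITION & SPEC =====
def Spec_compileRules (rules : List (Int × Int)) (out : List (Int × List Int)) : Prop := out = compileRules_alt rules
instance (rules : List (Int × Int)) (out : List (Int × List Int)) : Decidable (Spec_compileRules rules out) := by unfold Spec_compileRules; infer_instance

-- ===== CLAIM (what is proved, stated in full; the proofs are below) =====
def Claim_equal_compileRules : Prop := ∀ (rules : List (Int × Int)), Dom_compileRules rules → Spec_compileRules rules (compileRules rules)

-- ===== LEMMAS AND PROOFS =====

-- A's loop body collapses to a single insert.
theorem pvStepA_eq (d : PySem.Dict Int (PySem.Set Int)) (r : Int × Int) :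
    (let result := if !(d.contains r.1) then d.insert r.1 PySem.Set.empty else d
     result.insert r.1 (PySem.Set.add (result.getD r.1 PySem.Set.empty) r.2)) =
    d.insert r.1 (PySem.Set.add (d.getD r.1 PySem.Set.empty) r.2) := by
  by_cases h : d.contains r.1
  · simp [h]
  · simp only [h, Bool.not_false, if_true]
    rw [PySem.Dict.getD_insert_self, PySem.Dict.insert_insert_self,
        PySem.Dict.getD_of_not_contains d PySem.Set.empty (by simpa using h)]

theorem pvFoldA_eq (l : List (Int × Int)) (d : PySem.Dict Int (PySem.Set Int)) :
    l.foldl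
      (fun result r =>
        let first := r.1
        let after := r.2
        let result := if !(result.contains first) then result.insert first PySem.Set.empty else result
        result.insert first (PySem.Set.add (result.getD first PySem.Set.empty) after)) d =
    l.foldl (fun d r => d.insert r.1 (PySem.Set.add (d.getD r.1 PySem.Set.empty) r.2)) d := by
  simp only [pvStepA_eq]

theorem pvFoldA_getD (l : List (Int × Int)) (d : PySem.Dict Int (PySem.Set Int)) (k : Int) :
    (l.foldl (fun d r => d.insert r.1 (PySem.Set.add (d.getD r.1 PySem.Set.empty) r.2)) d).getD k PySem.Set.empty =
    PySem.Set.update (d.getD k PySem.Set.empty) ((l.filter (fun r => r.1 == k)).map (·.2)) := by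
  induction l generalizing d with
  | nil => simp [PySem.Set.update_nil]
  | cons r t ih =>
    simp only [List.foldl_cons, List.filter_cons, ih]
    by_cases h : r.1 = k
    · simp [h, PySem.Set.update_cons]
    · simp [h, PySem.Dict.getD_insert, Ne.symm h]

theorem pvFoldA_keys (l : List (Int × Int)) (d : PySem.Dict Int (PySem.Set Int)) :
    (l.foldl (fun d r => d.insert r.1 (PySem.Set.add (d.getD r.1 PySem.Set.empty) r.2)) d).keys =
    PySem.Set.update d.keys (l.map (·.1)) :=
  PySem.Dict.keys_foldl_insert_key l (·.1) (fun d r => PySem.Set.add (d.getD r.1 PySem.Set.empty) r.2) d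

-- ===== VERDICT (by name: the statement is the Claim_ definition above) =====
theorem compileRules_spec : Claim_equal_compileRules := by
  intro rules _
  show compileRules rules = compileRules_alt rules
  unfold compileRules compileRules_alt
  rw [pvFoldA_eq]
  have hnd : (rules.foldl (fun d r => d.insert r.1 (PySem.Set.add (d.getD r.1 PySem.Set.empty) r.2))
      (PySem.Dict.empty : PySem.Dict Int (PySem.Set Int))).keys.Nodup :=
    PySem.Dict.nodup_keys_foldl_insert_key rules (·.1) _ _ PySem.Dict.nodup_keys_empty
  rw [PySem.Dict.items_eq_map_keys _ hnd PySem.Set.empty, pvFoldA_keys,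
      PySem.Dict.keys_empty, PySem.Set.update_nil_left]
  refine List.map_congr_left ?_
  intro k _
  rw [pvFoldA_getD, PySem.Dict.getD_empty]
  simp [PySem.Set.empty, PySem.Set.update_nil_left]
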